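-- pv_equiv track=rewrite | github.com/lina-zulfikar/POM_python_selenium | metrics/calculate_nop.py | calculate_nop
-- ===== SOURCE A (Python) =====
-- def calculate_nop(class_methods, class_parents):
--     nop_values = {}
--     for cls, methods in class_methods.items():
--         poly_methods = set()
--
--         # Mencari subkelas yang mewarisi class ini
--         for subclass, parents in class_parents.items():
--             if cls in parents:
--                 # Cek apakah subclass meng-override metode dari parent
--                 for method in class_methods[subclass]:
--                     if method in methods:
--                         poly_methods.add(method)
--
--         # Menyimpan jumlah metode polimorfik untuk setiap class
--         nop_values[cls] = len(poly_methods)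
--
--     return nop_values
-- ===== SOURCE B (Python) =====
-- def calculate_nop(class_methods, class_parents):
--     # Edge-inverted single pass: seed an empty set per class, then walk each
--     # (subclass, parents) edge once, adding the child/parent method intersection
--     # to every parent's set; finally read off the sizes in class_methods order.
--     poly = {cls: set() for cls in class_methods}
--     for subclass, parents in class_parents.items():
--         child_methods = class_methods.get(subclass)
--         if child_methods is None:
--             continue
--         child_set = set(child_methods)
--         for parent in parents:
--             if parent in poly:
--                 poly[parent] |= child_set & set(class_methods[parent])
--     return {cls: len(poly[cls]) for cls in class_methods}
-- ===== Notes on version B (the rewrite author's own statement) =====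
-- stated objective: faster
-- what changed: Instead of scanning all of class_parents (and re-reading subclass method lists) once per class, B inverts the iteration: one pass over the inheritance edges accumulates, per parent class, the set-intersection of child and parent method sets, then sizes are read off per class.
-- outside the precondition, e.g. on calculate_nop({'A': ['f']}, {'B': ['A']}): A raises KeyError, B returns {'A': 0}
import Mathlib
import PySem

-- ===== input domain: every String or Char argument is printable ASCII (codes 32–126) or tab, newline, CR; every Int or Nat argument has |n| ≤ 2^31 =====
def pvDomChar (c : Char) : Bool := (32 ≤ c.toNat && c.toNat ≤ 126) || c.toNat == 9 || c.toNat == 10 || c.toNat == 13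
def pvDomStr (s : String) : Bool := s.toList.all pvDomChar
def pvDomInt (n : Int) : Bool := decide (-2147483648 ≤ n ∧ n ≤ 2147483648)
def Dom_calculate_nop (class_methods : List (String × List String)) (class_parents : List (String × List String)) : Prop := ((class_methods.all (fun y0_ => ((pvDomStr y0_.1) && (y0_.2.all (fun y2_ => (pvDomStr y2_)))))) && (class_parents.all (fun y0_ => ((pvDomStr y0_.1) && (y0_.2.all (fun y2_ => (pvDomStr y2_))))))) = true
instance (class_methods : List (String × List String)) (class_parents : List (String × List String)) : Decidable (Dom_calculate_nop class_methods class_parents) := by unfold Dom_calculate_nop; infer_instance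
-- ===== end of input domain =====

-- B replaces A's per-class rescan of all inheritance edges by one edge-inverted pass
-- accumulating, per parent, the child∩parent method-set intersections (objective: faster).

-- ===== PORT A =====
-- inner loop body of A: the polymorphic-method set collected for one class
-- ('class_methods[subclass]' is a dict lookup that raises KeyError when the key is
-- missing; Pre_ excludes that, so the '.getD []' default never fires inside Pre_)
def polyA (class_methods : List (String × List String)) (class_parents : List (String × List String))
    (cls : String) (methods : List String) : PySem.Set String :=
  class_parents.foldl (fun s q =>
    if q.2.contains cls then
      (((PySem.Dict.mk class_methods).get? q.1).getD []).foldl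
        (fun s2 m => if methods.contains m then PySem.Set.add s2 m else s2) s
    else s) PySem.Set.empty

-- 'nop_values' is a dict keyed by the classes of class_methods; those keys are distinct
-- under Pre_, so each dict insertion appends a fresh pair.
def calculate_nop (class_methods : List (String × List String)) (class_parents : List (String × List String)) : List (String × Int) :=
  class_methods.foldl (fun nop p =>
    nop ++ [(p.1, PySem.Set.len (polyA class_methods class_parents p.1 p.2))]) []

-- ===== PORT B =====
-- one inheritance edge of Source B's main loop: add the child∩parent intersection to every
-- listed parent that has a slot ('class_methods[parent]' exists whenever 'parent in poly')
def stepB (cmd : PySem.Dict String (List String))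
    (d : PySem.Dict String (PySem.Set String)) (q : String × List String) : PySem.Dict String (PySem.Set String) :=
  match cmd.get? q.1 with
  | none => d
  | some childMethods =>
    q.2.foldl (fun d2 par =>
      if d2.contains par then
        d2.insert par (PySem.Set.union (d2.getD par PySem.Set.empty)
          (PySem.Set.inter (PySem.Set.ofList childMethods)
            (PySem.Set.ofList ((cmd.get? par).getD []))))
      else d2) d

-- final comprehension iterates class_methods' keys, distinct under Pre_
def calculate_nop_alt (class_methods : List (String × List String)) (class_parents : List (String × List String)) : List (String × Int) :=
  let poly := class_parents.foldl (stepB (PySem.Dict.mk class_methods))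
    (PySem.Dict.ofList (class_methods.map (fun p => (p.1, (PySem.Set.empty : PySem.Set String)))))
  class_methods.map (fun p => (p.1, PySem.Set.len (poly.getD p.1 PySem.Set.empty)))

-- ===== PRECONDITION & SPEC =====
-- Pre_ requires (a) unique keys in both association lists (they stand for Python dicts),
-- and (b) no KeyError: every subclass whose parent list mentions a known class is itself
-- a key of class_methods (otherwise A raises KeyError at class_methods[subclass]).
def Pre_calculate_nop (class_methods : List (String × List String)) (class_parents : List (String × List String)) : Prop :=
  (class_methods.map Prod.fst).Nodup ∧ (class_parents.map Prod.fst).Nodup ∧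
  ∀ q ∈ class_parents, (∃ p ∈ class_methods, p.1 ∈ q.2) → q.1 ∈ class_methods.map Prod.fst
instance (class_methods : List (String × List String)) (class_parents : List (String × List String)) : Decidable (Pre_calculate_nop class_methods class_parents) := by unfold Pre_calculate_nop; infer_instance

def pvWitness_calculate_nop : (List (String × List String)) × (List (String × List String)) :=
  ([("A", ["f"]), ("B", ["f", "g"])], [("B", ["A"])])

def Spec_calculate_nop (class_methods : List (String × List String)) (class_parents : List (String × List String)) (out : List (String × Int)) : Prop := out = calculate_nop_alt class_methods class_parents
instance (class_methods : List (String × List String)) (class_parents : List (String × List String)) (out : List (String × Int)) : Decidable (Spec_calculate_nop class_methods class_parents out) := by unfold Spec_calculate_nop; infer_instance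

-- ===== CLAIM (what is proved, stated in full; the proofs are below) =====
def Claim_equal_calculate_nop : Prop := ∀ (class_methods : List (String × List String)) (class_parents : List (String × List String)), Dom_calculate_nop class_methods class_parents → Pre_calculate_nop class_methods class_parents → Spec_calculate_nop class_methods class_parents (calculate_nop class_methods class_parents)
-- ===== LEMMAS AND PROOFS =====

-- a Dict contains a key iff the key is among its keys
theorem dict_contains_iff {κ ν : Type} [BEq κ] [LawfulBEq κ] (d : PySem.Dict κ ν) (c : κ) :
    d.contains c = true ↔ c ∈ d.keys := by
  simp [PySem.Dict.contains, PySem.Dict.keys, List.any_eq_true, List.mem_map]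

theorem dict_contains_insert {κ ν : Type} [BEq κ] [LawfulBEq κ] (d : PySem.Dict κ ν) (k c : κ) (v : ν) :
    ((d.insert k v).contains c = true) ↔ (c = k ∨ d.contains c = true) := by
  rw [dict_contains_iff, PySem.Dict.mem_keys_insert, dict_contains_iff]

-- ----- A side -----
theorem mem_innerA (methods : List String) :
    ∀ (ms : List String) (s : PySem.Set String) (m : String),
      m ∈ ms.foldl (fun s2 m => if methods.contains m then PySem.Set.add s2 m else s2) s ↔
        m ∈ s ∨ (m ∈ ms ∧ m ∈ methods) := by
  intro ms
  induction ms with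
  | nil => intro s m; simp
  | cons x xs ih =>
    intro s m
    simp only [List.foldl_cons]
    by_cases hx : x ∈ methods
    · rw [if_pos (by simpa using hx), ih]
      simp only [PySem.Set.mem_add, List.mem_cons]
      constructor
      · rintro (⟨h | rfl⟩ | ⟨h1, h2⟩)
        · exact Or.inl h
        · exact Or.inr ⟨Or.inl rfl, hx⟩
        · exact Or.inr ⟨Or.inr h1, h2⟩
      · rintro (h | ⟨(rfl | h1), h2⟩)
        · exact Or.inl (Or.inl h)
        · exact Or.inl (Or.inr rfl)
        · exact Or.inr ⟨h1, h2⟩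
    · rw [if_neg (by simpa using hx), ih]
      simp only [List.mem_cons]
      constructor
      · rintro (h | ⟨h1, h2⟩)
        · exact Or.inl h
        · exact Or.inr ⟨Or.inr h1, h2⟩
      · rintro (h | ⟨(rfl | h1), h2⟩)
        · exact Or.inl h
        · exact absurd h2 hx
        · exact Or.inr ⟨h1, h2⟩

theorem nodup_innerA (methods : List String) :
    ∀ (ms : List String) (s : PySem.Set String), s.Nodup →
      (ms.foldl (fun s2 m => if methods.contains m then PySem.Set.add s2 m else s2) s).Nodup := by
  intro ms
  induction ms with
  | nil => intro s hs; simpa using hs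
  | cons x xs ih =>
    intro s hs
    simp only [List.foldl_cons]
    split
    · exact ih _ (PySem.Set.nodup_add s x hs)
    · exact ih _ hs

theorem mem_polyA_fold (cm : List (String × List String)) (cls : String) (methods : List String) :
    ∀ (cp : List (String × List String)) (s : PySem.Set String) (m : String),
      m ∈ cp.foldl (fun s q =>
          if q.2.contains cls then
            (((PySem.Dict.mk cm).get? q.1).getD []).foldl
              (fun s2 m => if methods.contains m then PySem.Set.add s2 m else s2) s
          else s) s ↔
        m ∈ s ∨ ∃ q ∈ cp, cls ∈ q.2 ∧
          m ∈ ((PySem.Dict.mk cm).get? q.1).getD [] ∧ m ∈ methods := by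
  intro cp
  induction cp with
  | nil => intro s m; simp
  | cons q qs ih =>
    intro s m
    simp only [List.foldl_cons, List.mem_cons]
    by_cases hq : cls ∈ q.2
    · rw [if_pos (by simpa using hq), ih, mem_innerA]
      constructor
      · rintro (⟨h | ⟨h1, h2⟩⟩ | ⟨r, hr, h⟩)
        · exact Or.inl h
        · exact Or.inr ⟨q, Or.inl rfl, hq, h1, h2⟩
        · exact Or.inr ⟨r, Or.inr hr, h⟩
      · rintro (h | ⟨r, (rfl | hr), h⟩)
        · exact Or.inl (Or.inl h)
        · exact Or.inl (Or.inr ⟨h.2.1, h.2.2⟩)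
        · exact Or.inr ⟨r, hr, h⟩
    · rw [if_neg (by simpa using hq), ih]
      constructor
      · rintro (h | ⟨r, hr, h⟩)
        · exact Or.inl h
        · exact Or.inr ⟨r, Or.inr hr, h⟩
      · rintro (h | ⟨r, (rfl | hr), h⟩)
        · exact Or.inl h
        · exact absurd h.1 hq
        · exact Or.inr ⟨r, hr, h⟩

theorem nodup_polyA (cm cp : List (String × List String)) (cls : String) (methods : List String) :
    (polyA cm cp cls methods).Nodup := by
  unfold polyA
  generalize hs : (PySem.Set.empty : PySem.Set String) = s
  have hsn : s.Nodup := by rw [← hs]; exact List.nodup_nil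
  clear hs
  induction cp generalizing s with
  | nil => simpa using hsn
  | cons q qs ih =>
    simp only [List.foldl_cons]
    split
    · exact ih _ (nodup_innerA methods _ s hsn)
    · exact ih _ hsn

-- ----- B side -----
theorem contains_innerB (cmd : PySem.Dict String (List String)) (childMethods : List String) :
    ∀ (l : List String) (d : PySem.Dict String (PySem.Set String)) (c : String),
      ((l.foldl (fun d2 par =>
        if d2.contains par then
          d2.insert par (PySem.Set.union (d2.getD par PySem.Set.empty)
            (PySem.Set.inter (PySem.Set.ofList childMethods)
              (PySem.Set.ofList ((cmd.get? par).getD [])))) else d2) d).contains c = true) ↔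
        d.contains c = true := by
  intro l
  induction l with
  | nil => intro d c; simp
  | cons par ps ih =>
    intro d c
    simp only [List.foldl_cons]
    rw [ih]
    by_cases hp : d.contains par = true
    · rw [if_pos hp, dict_contains_insert]
      constructor
      · rintro (rfl | h)
        · exact hp
        · exact h
      · exact Or.inr
    · rw [if_neg hp]

theorem getD_innerB (cmd : PySem.Dict String (List String)) (childMethods : List String) :
    ∀ (l : List String) (d : PySem.Dict String (PySem.Set String)) (c : String) (m : String),
      m ∈ ((l.foldl (fun d2 par =>
        if d2.contains par then
          d2.insert par (PySem.Set.union (d2.getD par PySem.Set.empty)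
            (PySem.Set.inter (PySem.Set.ofList childMethods)
              (PySem.Set.ofList ((cmd.get? par).getD [])))) else d2) d).getD c PySem.Set.empty) ↔
        m ∈ d.getD c PySem.Set.empty ∨
          (d.contains c = true ∧ c ∈ l ∧ m ∈ childMethods ∧ m ∈ (cmd.get? c).getD []) := by
  intro l
  induction l with
  | nil => intro d c m; simp
  | cons par ps ih =>
    intro d c m
    simp only [List.foldl_cons, List.mem_cons]
    by_cases hp : d.contains par = true
    · rw [if_pos hp, ih, dict_contains_insert, PySem.Dict.getD_insert]
      by_cases hc : c = par
      · subst hc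
        rw [if_pos rfl, PySem.Set.mem_union, PySem.Set.mem_inter,
          PySem.Set.mem_ofList, PySem.Set.mem_ofList]
        constructor
        · rintro (⟨h | ⟨h1, h2⟩⟩ | ⟨-, hc2, h⟩)
          · exact Or.inl h
          · exact Or.inr ⟨hp, Or.inl rfl, h1, h2⟩
          · exact Or.inr ⟨hp, Or.inr hc2, h⟩
        · rintro (h | ⟨-, (h2 | h2), h3, h4⟩)
          · exact Or.inl (Or.inl h)
          · exact Or.inl (Or.inr ⟨h3, h4⟩)
          · exact Or.inr ⟨Or.inl rfl, h2, h3, h4⟩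
      · rw [if_neg hc]
        constructor
        · rintro (h | ⟨(h1 | h1), hc2, h⟩)
          · exact Or.inl h
          · exact absurd h1 hc
          · exact Or.inr ⟨h1, Or.inr hc2, h⟩
        · rintro (h | ⟨h1, (h2 | h2), h⟩)
          · exact Or.inl h
          · exact absurd h2 hc
          · exact Or.inr ⟨Or.inr h1, h2, h⟩
    · rw [if_neg hp, ih]
      constructor
      · rintro (h | ⟨h1, h2, h⟩)
        · exact Or.inl h
        · exact Or.inr ⟨h1, Or.inr h2, h⟩
      · rintro (h | ⟨h1, (h2 | h2), h⟩)
        · exact Or.inl h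
        · exact absurd (h2 ▸ h1) hp
        · exact Or.inr ⟨h1, h2, h⟩

theorem nodup_innerB (cmd : PySem.Dict String (List String)) (childMethods : List String) :
    ∀ (l : List String) (d : PySem.Dict String (PySem.Set String)),
      (∀ c, (d.getD c PySem.Set.empty).Nodup) →
      ∀ c, ((l.foldl (fun d2 par =>
        if d2.contains par then
          d2.insert par (PySem.Set.union (d2.getD par PySem.Set.empty)
            (PySem.Set.inter (PySem.Set.ofList childMethods)
              (PySem.Set.ofList ((cmd.get? par).getD [])))) else d2) d).getD c PySem.Set.empty).Nodup := by
  intro l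
  induction l with
  | nil => intro d hd c; simpa using hd c
  | cons par ps ih =>
    intro d hd c
    simp only [List.foldl_cons]
    by_cases hp : d.contains par = true
    · rw [if_pos hp]
      apply ih
      intro c'
      rw [PySem.Dict.getD_insert]
      split_ifs with h
      · exact PySem.Set.nodup_union _ _ (hd par)
      · exact hd c'
    · rw [if_neg hp]; exact ih d hd c

theorem mem_foldB (cmd : PySem.Dict String (List String)) :
    ∀ (cp : List (String × List String)) (d : PySem.Dict String (PySem.Set String)) (c : String) (m : String),
      m ∈ ((cp.foldl (stepB cmd) d).getD c PySem.Set.empty) ↔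
        m ∈ d.getD c PySem.Set.empty ∨
          (d.contains c = true ∧ ∃ q ∈ cp, c ∈ q.2 ∧
            m ∈ (cmd.get? q.1).getD [] ∧ m ∈ (cmd.get? c).getD []) := by
  intro cp
  induction cp with
  | nil => intro d c m; simp
  | cons q qs ih =>
    intro d c m
    simp only [List.foldl_cons, List.mem_cons]
    rw [ih]
    cases hq : cmd.get? q.1 with
    | none =>
      simp only [stepB, hq]
      constructor
      · rintro (h | ⟨h1, r, hr, h⟩)
        · exact Or.inl h
        · exact Or.inr ⟨h1, r, Or.inr hr, h⟩
      · rintro (h | ⟨h1, r, (rfl | hr), h2, h3, h4⟩)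
        · exact Or.inl h
        · rw [hq] at h3; simp at h3
        · exact Or.inr ⟨h1, r, hr, h2, h3, h4⟩
    | some childMethods =>
      simp only [stepB, hq]
      rw [getD_innerB, contains_innerB]
      constructor
      · rintro (⟨h | ⟨h1, h2, h3, h4⟩⟩ | ⟨h1, r, hr, h⟩)
        · exact Or.inl h
        · exact Or.inr ⟨h1, q, Or.inl rfl, h2, by rw [hq]; exact h3, h4⟩
        · exact Or.inr ⟨h1, r, Or.inr hr, h⟩
      · rintro (h | ⟨h1, r, (rfl | hr), h2, h3, h4⟩)
        · exact Or.inl (Or.inl h)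
        · rw [hq] at h3
          exact Or.inl (Or.inr ⟨h1, h2, by simpa using h3, h4⟩)
        · exact Or.inr ⟨h1, r, hr, h2, h3, h4⟩

theorem nodup_foldB (cmd : PySem.Dict String (List String)) :
    ∀ (cp : List (String × List String)) (d : PySem.Dict String (PySem.Set String)),
      (∀ c, (d.getD c PySem.Set.empty).Nodup) →
      ∀ c, ((cp.foldl (stepB cmd) d).getD c PySem.Set.empty).Nodup := by
  intro cp
  induction cp with
  | nil => intro d hd c; simpa using hd c
  | cons q qs ih =>
    intro d hd c
    simp only [List.foldl_cons]
    apply ih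
    intro c'
    cases hq : cmd.get? q.1 with
    | none => simp only [stepB, hq]; exact hd c'
    | some childMethods =>
      simp only [stepB, hq]
      exact nodup_innerB cmd childMethods q.2 d hd c'

-- ----- the initial dict {cls: set() for cls in class_methods} -----
theorem contains_foldl_insert :
    ∀ (l : List (String × PySem.Set String)) (d : PySem.Dict String (PySem.Set String)) (c : String),
      ((l.foldl (fun acc p => acc.insert p.1 p.2) d).contains c = true) ↔
        c ∈ l.map Prod.fst ∨ d.contains c = true := by
  intro l
  induction l with
  | nil => intro d c; simp
  | cons p ps ih =>
    intro d c
    simp only [List.foldl_cons, List.map_cons, List.mem_cons]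
    rw [ih, dict_contains_insert]
    tauto

theorem getD_foldl_insert_empty :
    ∀ (l : List (String × List String)) (d : PySem.Dict String (PySem.Set String)),
      (∀ c, d.getD c PySem.Set.empty = PySem.Set.empty) →
      ∀ c, ((l.map (fun p => (p.1, (PySem.Set.empty : PySem.Set String)))).foldl
        (fun acc p => acc.insert p.1 p.2) d).getD c PySem.Set.empty = PySem.Set.empty := by
  intro l
  induction l with
  | nil => intro d hd c; simpa using hd c
  | cons p ps ih =>
    intro d hd c
    simp only [List.map_cons, List.foldl_cons]
    apply ih
    intro c'
    rw [PySem.Dict.getD_insert]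
    split_ifs with h
    · rfl
    · exact hd c'

theorem getD_poly0 (cm : List (String × List String)) (c : String) :
    (PySem.Dict.ofList (cm.map (fun p => (p.1, (PySem.Set.empty : PySem.Set String))))).getD c PySem.Set.empty = PySem.Set.empty := by
  unfold PySem.Dict.ofList PySem.Dict.update
  apply getD_foldl_insert_empty
  intro c'
  simp [PySem.Dict.getD, PySem.Dict.get?, PySem.Dict.empty]

theorem contains_poly0 (cm : List (String × List String)) (c : String) :
    ((PySem.Dict.ofList (cm.map (fun p => (p.1, (PySem.Set.empty : PySem.Set String))))).contains c = true) ↔ c ∈ cm.map Prod.fst := by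
  unfold PySem.Dict.ofList PySem.Dict.update
  rw [contains_foldl_insert]
  simp [PySem.Dict.contains, PySem.Dict.empty, List.map_map, Function.comp]

-- first-match lookup in a nodup-keyed dict finds the pair itself
theorem get?_mk_of_mem (cm : List (String × List String)) (p : String × List String)
    (hmem : p ∈ cm) (hnd : (cm.map Prod.fst).Nodup) :
    (PySem.Dict.mk cm).get? p.1 = some p.2 := by
  apply PySem.Dict.get?_of_mem_items
  · show (p.1, p.2) ∈ (PySem.Dict.mk cm).items
    simpa using hmem
  · rw [PySem.Dict.keys_mk]; exact hnd

theorem main_equiv (cm cp : List (String × List String)) (h : Pre_calculate_nop cm cp) :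
    calculate_nop cm cp = calculate_nop_alt cm cp := by
  obtain ⟨hnd, -, -⟩ := h
  unfold calculate_nop calculate_nop_alt
  rw [PySem.List.foldl_append_singleton_eq_map
    (fun p => (p.1, PySem.Set.len (polyA cm cp p.1 p.2))) cm []]
  simp only [List.nil_append]
  apply List.map_congr_left
  intro p hp
  have hlk : (PySem.Dict.mk cm).get? p.1 = some p.2 := get?_mk_of_mem cm p hp hnd
  have hkey : p.1 ∈ cm.map Prod.fst := List.mem_map.mpr ⟨p, hp, rfl⟩
  congr 1
  unfold PySem.Set.len
  congr 1
  have hA : (polyA cm cp p.1 p.2).Nodup := nodup_polyA cm cp p.1 p.2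
  have hB : ((cp.foldl (stepB (PySem.Dict.mk cm))
      (PySem.Dict.ofList (cm.map (fun p => (p.1, (PySem.Set.empty : PySem.Set String)))))).getD p.1 PySem.Set.empty).Nodup := by
    apply nodup_foldB
    intro c; rw [getD_poly0]; exact List.nodup_nil
  apply List.Perm.length_eq
  rw [List.perm_ext_iff_of_nodup hA hB]
  intro m
  unfold polyA
  rw [mem_polyA_fold, mem_foldB, getD_poly0]
  have hc0 : ((PySem.Dict.ofList (cm.map (fun p => (p.1, (PySem.Set.empty : PySem.Set String))))).contains p.1 = true) :=
    (contains_poly0 cm p.1).mpr hkey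
  simp only [PySem.Set.empty, List.not_mem_nil, false_or]
  constructor
  · rintro ⟨q, hq, h1, h2, h3⟩
    exact ⟨hc0, q, hq, h1, h2, by rw [hlk]; exact h3⟩
  · rintro ⟨-, q, hq, h1, h2, h3⟩
    refine ⟨q, hq, h1, h2, ?_⟩
    rw [hlk] at h3; exact h3

-- ===== VERDICT (by name: the statement is the Claim_ definition above) =====
theorem calculate_nop_spec : Claim_equal_calculate_nop := by
  intro cm cp _ hpre
  exact main_equiv cm cp hpre
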